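-- pv_equiv track=rewrite | github.com/jatinsethi98/data-clients | src/data_clients/browser/parser.py | _is_excluded_domain
-- ===== SOURCE A (Python) =====
-- def _is_excluded_domain(domain: str, excluded_domains: list[str]) -> bool:
--     for blocked in excluded_domains:
--         b = blocked.strip().lower()
--         if not b:
--             continue
--         if domain == b or domain.endswith(f".{b}"):
--             return True
--     return False
-- ===== SOURCE B (Python) =====
-- def _is_excluded_domain(domain: str, excluded_domains: list[str]) -> bool:
--     s = set()
--     for e in excluded_domains:
--         b = e.strip().lower()
--         if b:
--             s.add(b)
--     if domain in s:
--         return True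
--     for i, ch in enumerate(domain):
--         if ch == '.' and domain[i + 1:] in s:
--             return True
--     return False
-- ===== Notes on version B (the rewrite author's own statement) =====
-- stated objective: alternative
-- what changed: B builds a set of the normalized excluded entries once, then enumerates the domain's own dot-boundary suffixes and tests each for membership, instead of scanning the excluded list and doing an endswith per entry.
import Mathlib
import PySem

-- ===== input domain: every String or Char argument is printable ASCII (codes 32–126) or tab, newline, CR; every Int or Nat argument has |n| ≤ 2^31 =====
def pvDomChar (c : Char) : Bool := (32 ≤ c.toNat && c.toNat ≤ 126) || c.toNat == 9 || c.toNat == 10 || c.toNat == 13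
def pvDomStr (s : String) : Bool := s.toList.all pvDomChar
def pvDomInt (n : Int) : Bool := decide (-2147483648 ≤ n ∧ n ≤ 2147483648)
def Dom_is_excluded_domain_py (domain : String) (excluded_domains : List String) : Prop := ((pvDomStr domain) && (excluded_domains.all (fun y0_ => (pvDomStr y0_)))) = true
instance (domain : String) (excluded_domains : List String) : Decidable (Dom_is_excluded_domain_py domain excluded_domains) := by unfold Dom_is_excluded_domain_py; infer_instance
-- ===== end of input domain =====

-- B builds the set of normalized excluded entries once and tests the domain's dot-boundary
-- suffixes for membership, instead of scanning the excluded list with an endswith per entry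
-- (alternative decomposition; return values proved equal on all inputs).


-- ===== PORT A =====
-- normalization 'blocked.strip().lower()' on the List Char side
def pvNorm (e : String) : List Char := PySem.Chars.lower (PySem.Chars.strip e.toList)

-- the 'for blocked in excluded_domains' loop of A
def pvALoop (d : List Char) : List String → Bool
  | [] => false
  | blocked :: rest =>
    let b := pvNorm blocked
    if b = [] then pvALoop d rest
    else if d = b ∨ PySem.Chars.endswith d ('.' :: b) = true then true
    else pvALoop d rest

def is_excluded_domain_py (domain : String) (excluded_domains : List String) : Bool :=
  pvALoop domain.toList excluded_domains

-- ===== PORT B =====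
-- 'for e in excluded_domains: b = e.strip().lower(); if b: s.add(b)'
def pvBuildSet (excluded_domains : List String) : PySem.Set (List Char) :=
  excluded_domains.foldl
    (fun acc e =>
      let b := pvNorm e
      if b = [] then acc else PySem.Set.add acc b)
    PySem.Set.empty

-- 'for i, ch in enumerate(domain): if ch == "." and domain[i+1:] in s: return True'
-- (the tail after position i IS domain[i+1:])
def pvBLoop (s : PySem.Set (List Char)) : List Char → Bool
  | [] => false
  | c :: rest => (c = '.' && PySem.Set.contains s rest) || pvBLoop s rest

def is_excluded_domain_py_alt (domain : String) (excluded_domains : List String) : Bool :=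
  let s := pvBuildSet excluded_domains
  let d := domain.toList
  if PySem.Set.contains s d then true
  else pvBLoop s d

-- ===== PRECONDITION & SPEC =====
def Spec_is_excluded_domain_py (domain : String) (excluded_domains : List String) (out : Bool) : Prop := out = is_excluded_domain_py_alt domain excluded_domains
instance (domain : String) (excluded_domains : List String) (out : Bool) : Decidable (Spec_is_excluded_domain_py domain excluded_domains out) := by unfold Spec_is_excluded_domain_py; infer_instance

-- ===== CLAIM (what is proved, stated in full; the proofs are below) =====
def Claim_equal_is_excluded_domain_py : Prop := ∀ (domain : String) (excluded_domains : List String), Dom_is_excluded_domain_py domain excluded_domains → Spec_is_excluded_domain_py domain excluded_domains (is_excluded_domain_py domain excluded_domains)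

-- ===== LEMMAS AND PROOFS =====

-- A's loop hits iff some entry normalizes to a nonempty b with d = b or '.'::b a suffix of d
theorem pvALoop_iff (d : List Char) (l : List String) :
    pvALoop d l = true ↔
      ∃ e ∈ l, pvNorm e ≠ [] ∧ (d = pvNorm e ∨ ('.' :: pvNorm e) <:+ d) := by
  induction l with
  | nil => simp [pvALoop]
  | cons blocked rest ih =>
    simp only [pvALoop]
    by_cases hb : pvNorm blocked = []
    · simp [hb, ih]
    · rw [if_neg hb]
      by_cases hhit : d = pvNorm blocked ∨ PySem.Chars.endswith d ('.' :: pvNorm blocked) = true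
      · rw [if_pos hhit]
        simp only [true_iff]
        refine ⟨blocked, List.mem_cons_self, hb, ?_⟩
        rcases hhit with h | h
        · exact Or.inl h
        · exact Or.inr ((PySem.Chars.endswith_iff _ _).mp h)
      · rw [if_neg hhit, ih]
        constructor
        · rintro ⟨e, he, hne, hcase⟩
          exact ⟨e, List.mem_cons_of_mem _ he, hne, hcase⟩
        · rintro ⟨e, he, hne, hcase⟩
          rcases List.mem_cons.mp he with rfl | he'
          · exfalso
            apply hhit
            rcases hcase with h | h
            · exact Or.inl h
            · exact Or.inr ((PySem.Chars.endswith_iff _ _).mpr h)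
          · exact ⟨e, he', hne, hcase⟩

-- membership in B's fold-built set
theorem mem_pvBuildSet_fold (l : List String) (acc : PySem.Set (List Char)) (x : List Char) :
    x ∈ l.foldl (fun acc e => let b := pvNorm e; if b = [] then acc else PySem.Set.add acc b) acc ↔
      x ∈ acc ∨ ∃ e ∈ l, pvNorm e ≠ [] ∧ x = pvNorm e := by
  induction l generalizing acc with
  | nil => simp
  | cons e0 rest ih =>
    simp only [List.foldl_cons]
    by_cases hb : pvNorm e0 = []
    · rw [if_pos hb, ih]
      simp [hb]
    · rw [if_neg hb, ih]
      simp only [PySem.Set.mem_add, List.mem_cons]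
      constructor
      · rintro ((h | h) | ⟨e, he, hne, hx⟩)
        · exact Or.inl h
        · exact Or.inr ⟨e0, Or.inl rfl, hb, h⟩
        · exact Or.inr ⟨e, Or.inr he, hne, hx⟩
      · rintro (h | ⟨e, (rfl | he), hne, hx⟩)
        · exact Or.inl (Or.inl h)
        · exact Or.inl (Or.inr hx)
        · exact Or.inr ⟨e, he, hne, hx⟩

theorem mem_pvBuildSet (l : List String) (x : List Char) :
    x ∈ pvBuildSet l ↔ ∃ e ∈ l, pvNorm e ≠ [] ∧ x = pvNorm e := by
  unfold pvBuildSet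
  rw [mem_pvBuildSet_fold]
  simp [PySem.Set.empty]

-- B's domain scan hits iff some '.'-headed suffix tail is in the set
theorem pvBLoop_iff (s : PySem.Set (List Char)) (d : List Char) :
    pvBLoop s d = true ↔ ∃ t, ('.' :: t) <:+ d ∧ t ∈ s := by
  induction d with
  | nil => simp [pvBLoop]
  | cons c rest ih =>
    simp only [pvBLoop, Bool.or_eq_true, Bool.and_eq_true, decide_eq_true_eq,
      PySem.Set.contains_iff, ih]
    constructor
    · rintro (⟨hc, hm⟩ | ⟨t, ht, hm⟩)
      · exact ⟨rest, by simp [hc], hm⟩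
      · exact ⟨t, ht.trans (List.suffix_cons c rest), hm⟩
    · rintro ⟨t, ht, hm⟩
      rcases List.suffix_cons_iff.mp ht with h | h
      · cases h
        exact Or.inl ⟨rfl, hm⟩
      · exact Or.inr ⟨t, h, hm⟩

-- ===== VERDICT (by name: the statement is the Claim_ definition above) =====
theorem is_excluded_domain_py_spec : Claim_equal_is_excluded_domain_py := by
  intro domain excluded_domains _
  unfold Spec_is_excluded_domain_py is_excluded_domain_py is_excluded_domain_py_alt
  set s := pvBuildSet excluded_domains with hs
  set d := domain.toList with hd0
  by_cases hA : pvALoop d excluded_domains = true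
  · rw [hA]
    rcases (pvALoop_iff d excluded_domains).mp hA with ⟨e, he, hne, hd | hsuf⟩
    · have hc : PySem.Set.contains s d = true := by
        rw [PySem.Set.contains_iff, hs, mem_pvBuildSet]
        exact ⟨e, he, hne, hd⟩
      rw [if_pos hc]
    · by_cases hc : PySem.Set.contains s d = true
      · rw [if_pos hc]
      · rw [if_neg hc]
        exact ((pvBLoop_iff s d).mpr
          ⟨pvNorm e, hsuf, by rw [hs, mem_pvBuildSet]; exact ⟨e, he, hne, rfl⟩⟩).symm
  · rw [Bool.not_eq_true] at hA
    rw [hA]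
    have hnot : ∀ e ∈ excluded_domains, pvNorm e ≠ [] →
        d ≠ pvNorm e ∧ ¬ (('.' :: pvNorm e) <:+ d) := by
      intro e he hne
      constructor
      · intro h
        exact absurd ((pvALoop_iff d _).mpr ⟨e, he, hne, Or.inl h⟩) (by simp [hA])
      · intro h
        exact absurd ((pvALoop_iff d _).mpr ⟨e, he, hne, Or.inr h⟩) (by simp [hA])
    have hc : ¬ (PySem.Set.contains s d = true) := by
      rw [PySem.Set.contains_iff, hs, mem_pvBuildSet]
      rintro ⟨e, he, hne, h⟩
      exact (hnot e he hne).1 h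
    rw [if_neg hc]
    symm
    rw [Bool.eq_false_iff]
    intro h
    rcases (pvBLoop_iff s d).mp h with ⟨t, ht, hm⟩
    rw [hs, mem_pvBuildSet] at hm
    rcases hm with ⟨e, he, hne, rfl⟩
    exact (hnot e he hne).2 ht
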